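-- pv_equiv track=rewrite | github.com/kylefoley76/german_language_analyzer | general/very_general_functions.py | divide_dictionary
-- ===== SOURCE A (Python) =====
-- def divide_range(divisions: int, total: int, idx: int, begin=0):
--     sec = total // divisions
--     start = (idx * sec) + begin
--     if total % divisions != 0 and idx == divisions:
--         stop = total
--     else:
--         stop = start + sec
--     return start, stop
--
-- def divide_dictionary(dict1, divisions):
--     total = len(dict1)
--     keys = list(dict1.keys())
--     tdicts = []
--     for i in range(divisions):
--         start, stop = divide_range(divisions, total, i)
--         dict2 = {}
--         for j in range(start, stop):
--             dict2[keys[j]] = dict1[keys[j]]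
--         tdicts.append(dict2)
--
--     return tdicts
-- ===== SOURCE B (Python) =====
-- def divide_dictionary(dict1, divisions):
--     it = iter(dict1.items())
--
--     def take(n):
--         d = {}
--         for _ in range(n):
--             k, v = next(it)
--             d[k] = v
--         return d
--
--     return [take(len(dict1) // divisions) for _ in range(divisions)]
-- ===== Notes on version B (the rewrite author's own statement) =====
-- stated objective: idiomatic
-- what changed: B streams the dict items once through a shared iterator, letting each chunk consume the next len//divisions items, instead of A's precomputed key list with per-chunk start/stop index arithmetic (and its dead-branch divide_range helper) plus a dict lookup per key.
import Mathlib
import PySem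

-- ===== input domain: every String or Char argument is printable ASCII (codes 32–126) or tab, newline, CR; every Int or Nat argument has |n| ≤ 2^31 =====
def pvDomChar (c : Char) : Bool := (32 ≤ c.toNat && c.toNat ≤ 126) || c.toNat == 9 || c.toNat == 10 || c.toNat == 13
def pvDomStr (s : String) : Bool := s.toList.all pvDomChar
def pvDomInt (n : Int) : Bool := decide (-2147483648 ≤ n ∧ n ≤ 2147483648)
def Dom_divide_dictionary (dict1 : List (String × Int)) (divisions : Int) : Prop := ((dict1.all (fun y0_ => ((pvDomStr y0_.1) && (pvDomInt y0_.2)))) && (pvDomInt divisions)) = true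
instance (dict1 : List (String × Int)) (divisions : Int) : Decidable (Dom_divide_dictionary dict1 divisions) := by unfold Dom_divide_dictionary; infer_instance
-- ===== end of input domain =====

-- B replaces A's key-list plus per-chunk start/stop index arithmetic by a single sequential
-- consumption of the items (each chunk takes the next len//divisions items); same return value.

-- ===== PORT A =====
-- helper divide_range (begin has default 0 in Python; kept as an explicit parameter)
def divideRange (divisions total idx begin_ : Int) : Int × Int :=
  let sec := PySem.Int.floordiv total divisions
  let start := idx * sec + begin_
  if PySem.Int.mod total divisions ≠ 0 ∧ idx = divisions then (start, total)
  else (start, start + sec)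

def divide_dictionary (dict1 : List (String × Int)) (divisions : Int) : List (List (String × Int)) :=
  let total : Int := dict1.length
  let keys : List String := dict1.map Prod.fst
  (PySem.List.pyRange 0 divisions 1).foldl (fun tdicts i =>
    let sr := divideRange divisions total i 0
    let dict2 := (PySem.List.pyRange sr.1 sr.2 1).foldl
      (fun d j =>
        let k := PySem.List.pyGetD keys j ""                -- keys[j]; j is in range whenever this body runs
        d.insert k ((PySem.Dict.mk dict1).getD k 0))        -- dict1[keys[j]]; the key is always present
      PySem.Dict.empty
    tdicts ++ [dict2.items]) []

-- ===== PORT B =====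
-- take(n): pull the next n items from the shared iterator (the not-yet-consumed suffix `rest`)
def takeChunk : Nat → List (String × Int) → PySem.Dict String Int → PySem.Dict String Int × List (String × Int)
  | 0, rest, d => (d, rest)
  | _+1, [], d => (d, [])                                   -- next() would raise StopIteration; never reached by B
  | n+1, (k, v) :: rest, d => takeChunk n rest (d.insert k v)

def divide_dictionary_alt (dict1 : List (String × Int)) (divisions : Int) : List (List (String × Int)) :=
  ((PySem.List.pyRange 0 divisions 1).foldl
    (fun st _ =>
      let p := takeChunk (PySem.Int.floordiv dict1.length divisions).toNat st.2 PySem.Dict.empty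
      (st.1 ++ [p.1.items], p.2))
    (([] : List (List (String × Int))), dict1)).1

-- ===== PRECONDITION & SPEC =====
-- Pre_ excludes association lists with duplicate keys: they do not represent a Python dict
-- (A's parameter dict1 is a dict, whose keys are necessarily distinct).
def Pre_divide_dictionary (dict1 : List (String × Int)) (divisions : Int) : Prop :=
  (dict1.map Prod.fst).Nodup
instance (dict1 : List (String × Int)) (divisions : Int) : Decidable (Pre_divide_dictionary dict1 divisions) := by unfold Pre_divide_dictionary; infer_instance
def pvWitness_divide_dictionary : (List (String × Int)) × Int := ([("a", 1), ("b", 2), ("c", 3)], 2)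

def Spec_divide_dictionary (dict1 : List (String × Int)) (divisions : Int) (out : List (List (String × Int))) : Prop := out = divide_dictionary_alt dict1 divisions
instance (dict1 : List (String × Int)) (divisions : Int) (out : List (List (String × Int))) : Decidable (Spec_divide_dictionary dict1 divisions out) := by unfold Spec_divide_dictionary; infer_instance

-- ===== CLAIM (what is proved, stated in full; the proofs are below) =====
def Claim_equal_divide_dictionary : Prop := ∀ (dict1 : List (String × Int)) (divisions : Int), Dom_divide_dictionary dict1 divisions → Pre_divide_dictionary dict1 divisions → Spec_divide_dictionary dict1 divisions (divide_dictionary dict1 divisions)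

-- ===== LEMMAS AND PROOFS =====

-- a fold whose body ignores the list element is an iterate
lemma pv_foldl_ignore {α β : Type} (g : α → α) (l : List β) (init : α) :
    l.foldl (fun st _ => g st) init = g^[l.length] init := by
  induction l generalizing init with
  | nil => rfl
  | cons x xs ih => simp [List.foldl, ih, Function.iterate_succ_apply]

-- [xs[j] for j in range(a, b)] is the slice xs[a:b] (0 ≤ a ≤ b ≤ len)
lemma pv_map_pyGetD_range_slice {α : Type} (xs : List α) (d : α) (a b : Int)
    (ha : 0 ≤ a) (hab : a ≤ b) (hb : b ≤ (xs.length : Int)) :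
    (PySem.List.pyRange a b 1).map (fun j => PySem.List.pyGetD xs j d)
      = (xs.drop a.toNat).take (b - a).toNat := by
  have h2 : PySem.List.pyRange a (xs.length : Int) 1
      = PySem.List.pyRange a b 1 ++ PySem.List.pyRange b (xs.length : Int) 1 :=
    PySem.List.pyRange_one_append a b _ hab hb
  have h1 := PySem.List.map_pyGetD_pyRange' xs d ha
  rw [h2, List.map_append] at h1
  have hlen : ((PySem.List.pyRange a b 1).map (fun j => PySem.List.pyGetD xs j d)).length
      = (b - a).toNat := by
    simp [PySem.List.length_pyRange_one]
  rw [← h1, List.take_left' hlen]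

-- A's inner loop over range(i*sec, i*sec+sec) rebuilds the slice dict1[i*sec : i*sec+sec]
lemma pv_innerA (dict1 : List (String × Int)) (divisions i : Int)
    (hnd : (dict1.map Prod.fst).Nodup) (hpos : 0 < divisions) (h0 : 0 ≤ i) (hi : i < divisions) :
    ((PySem.List.pyRange (i * PySem.Int.floordiv (dict1.length : Int) divisions)
        (i * PySem.Int.floordiv (dict1.length : Int) divisions + PySem.Int.floordiv (dict1.length : Int) divisions) 1).foldl
      (fun d j =>
        PySem.Dict.insert d (PySem.List.pyGetD (dict1.map Prod.fst) j "")
          ((PySem.Dict.mk dict1).getD (PySem.List.pyGetD (dict1.map Prod.fst) j "") 0))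
      PySem.Dict.empty).items
    = (dict1.drop (i * PySem.Int.floordiv (dict1.length : Int) divisions).toNat).take
        (PySem.Int.floordiv (dict1.length : Int) divisions).toNat := by
  set s : Int := PySem.Int.floordiv (dict1.length : Int) divisions with hs
  have hse : s = (dict1.length : Int) / divisions := PySem.Int.floordiv_eq_ediv_of_pos hpos
  have hs0 : 0 ≤ s := by
    rw [hse]; exact Int.ediv_nonneg (by positivity) (le_of_lt hpos)
  have hstart0 : 0 ≤ i * s := mul_nonneg h0 hs0
  have hds : divisions * s ≤ (dict1.length : Int) := by
    rw [hse, mul_comm]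
    exact Int.ediv_mul_le _ (by omega)
  have hstop : i * s + s ≤ (dict1.length : Int) := by
    have h1 : (i + 1) * s ≤ divisions * s := mul_le_mul_of_nonneg_right (by omega) hs0
    nlinarith
  have hle : i * s ≤ i * s + s := by omega
  -- the keys visited are distinct
  have hkeys : (PySem.List.pyRange (i*s) (i*s+s) 1).map
      (fun j => PySem.List.pyGetD (dict1.map Prod.fst) j "")
      = ((dict1.map Prod.fst).drop (i*s).toNat).take ((i*s+s) - (i*s)).toNat := by
    apply pv_map_pyGetD_range_slice _ _ _ _ hstart0 hle
    simpa using hstop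
  have hkeysnd : ((PySem.List.pyRange (i*s) (i*s+s) 1).map
      (fun j => PySem.List.pyGetD (dict1.map Prod.fst) j "")).Nodup := by
    rw [hkeys]
    exact hnd.sublist ((List.take_sublist _ _).trans (List.drop_sublist _ _))
  have hfresh : ∀ a ∈ PySem.List.pyRange (i*s) (i*s+s) 1,
      (PySem.Dict.empty : PySem.Dict String Int).contains
        (PySem.List.pyGetD (dict1.map Prod.fst) a "") = false := by
    intro a _; exact PySem.Dict.contains_empty _
  rw [PySem.Dict.items_foldl_insert_fresh _ _ _ _ hfresh hkeysnd]
  have hempty : (PySem.Dict.empty : PySem.Dict String Int).items = [] := rfl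
  rw [hempty, List.nil_append]
  -- pointwise: each visited pair is dict1[j]
  have hmapeq : (PySem.List.pyRange (i*s) (i*s+s) 1).map
      (fun j => (PySem.List.pyGetD (dict1.map Prod.fst) j "",
        (PySem.Dict.mk dict1).getD (PySem.List.pyGetD (dict1.map Prod.fst) j "") 0))
      = (PySem.List.pyRange (i*s) (i*s+s) 1).map
      (fun j => PySem.List.pyGetD dict1 j ("", 0)) := by
    apply List.map_congr_left
    intro j hj
    have hjr := (PySem.List.mem_pyRange_one).mp hj
    have hj0 : 0 ≤ j := le_trans hstart0 hjr.1
    have hjlen : j < (dict1.length : Int) := lt_of_lt_of_le hjr.2 hstop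
    have hkey : PySem.List.pyGetD (dict1.map Prod.fst) j ""
        = (PySem.List.pyGetD dict1 j ("", 0)).1 := by
      have := PySem.List.pyGetD_map (Prod.fst) dict1 j ("", 0)
      simpa using this
    have hget := PySem.List.pyGetD_eq_getElem dict1 ("", 0) hj0 (by exact_mod_cast hjlen)
    have hmem : dict1[j.toNat]'(by omega) ∈ dict1 := List.getElem_mem _
    have hval : (PySem.Dict.mk dict1).getD (dict1[j.toNat]'(by omega)).1 0
        = (dict1[j.toNat]'(by omega)).2 := by
      apply PySem.Dict.getD_of_mem_items
      · show ((dict1[j.toNat]'(by omega)).1, (dict1[j.toNat]'(by omega)).2) ∈ dict1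
        exact hmem
      · exact hnd
    rw [hkey, hget, hval]
  rw [hmapeq, pv_map_pyGetD_range_slice dict1 ("", 0) _ _ hstart0 hle hstop]
  congr 1
  omega


-- B's take(sec) splits off the first sec pairs of the unconsumed suffix
lemma pv_takeChunk_spec : ∀ (m : Nat) (rest : List (String × Int)) (d : PySem.Dict String Int),
    ((d.items ++ rest.take m).map Prod.fst).Nodup → m ≤ rest.length →
    takeChunk m rest d = (PySem.Dict.mk (d.items ++ rest.take m), rest.drop m) := by
  intro m
  induction m with
  | zero =>
    intro rest d _ _
    simp [takeChunk]
  | succ n ih =>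
    intro rest d hnd hlen
    match rest with
    | [] => simp at hlen
    | (k, v) :: rest' =>
      have hfresh : d.contains k = false := by
        by_contra h
        have hc : d.contains k = true := by
          cases hcc : d.contains k with
          | false => exact absurd hcc h
          | true => rfl
        have hk : k ∈ d.keys := (PySem.Dict.contains_iff_mem_keys d k).mp hc
        have hk' : k ∈ d.items.map Prod.fst := hk
        obtain ⟨p, hp, hpk⟩ := List.mem_map.mp hk'
        simp [List.take_succ_cons, List.nodup_append] at hnd
        exact (hnd.2.2 p.1 p.2 (by simpa using hp)).1 hpk
      have hins := PySem.Dict.items_insert_of_not_contains d v hfresh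
      have hgoal := ih rest' (d.insert k v) (by
        rw [hins]
        simpa [List.append_assoc] using hnd) (by simpa using hlen)
      simp only [takeChunk, hgoal, hins]
      simp [List.append_assoc]


-- iterating B's loop body N times produces the N leading chunks
lemma pv_iterB (secN : Nat) :
    ∀ (N : Nat) (acc : List (List (String × Int))) (rest : List (String × Int)),
    (rest.map Prod.fst).Nodup → N * secN ≤ rest.length →
    (fun (st : List (List (String × Int)) × List (String × Int)) =>
        (st.1 ++ [(takeChunk secN st.2 PySem.Dict.empty).1.items],
         (takeChunk secN st.2 PySem.Dict.empty).2))^[N] (acc, rest)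
      = (acc ++ (List.range N).map (fun k => (rest.drop (k * secN)).take secN),
         rest.drop (N * secN)) := by
  intro N
  induction N with
  | zero => intro acc rest _ _; simp
  | succ n ih =>
    intro acc rest hnd hlen
    have hsec : secN ≤ rest.length := by
      have : (n+1) * secN = n * secN + secN := by ring
      omega
    have hempty : (PySem.Dict.empty : PySem.Dict String Int).items = [] := rfl
    have htc := pv_takeChunk_spec secN rest PySem.Dict.empty
      (by rw [hempty]; simpa [← List.map_take] using hnd.sublist ((List.take_sublist _ _).map _)) hsec
    rw [Function.iterate_succ_apply]
    simp only [htc, hempty, List.nil_append]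
    have hnd' : ((rest.drop secN).map Prod.fst).Nodup := by
      simpa [← List.map_drop] using hnd.sublist ((List.drop_sublist _ _).map _)
    have hlen' : n * secN ≤ (rest.drop secN).length := by
      simp only [List.length_drop]
      have : (n+1) * secN = n * secN + secN := by ring
      omega
    rw [ih (acc ++ [(PySem.Dict.mk (rest.take secN)).items]) (rest.drop secN) hnd' hlen']
    have hitems : (PySem.Dict.mk (rest.take secN)).items = rest.take secN := rfl
    rw [hitems]
    apply Prod.ext <;> simp only []
    · rw [List.range_succ_eq_map, List.map_cons, List.map_map]
      simp only [Nat.zero_mul, List.drop_zero, List.append_assoc, List.singleton_append]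
      congr 1
      congr 1
      apply List.map_congr_left
      intro k _
      simp only [Function.comp]
      rw [List.drop_drop]
      congr 2
      rw [Nat.succ_mul]
      exact Nat.add_comm _ _
    · rw [List.drop_drop]
      congr 1
      rw [Nat.succ_mul]
      exact Nat.add_comm _ _


-- ===== VERDICT (by name: the statement is the Claim_ definition above) =====
theorem divide_dictionary_spec : Claim_equal_divide_dictionary := by
  intro dict1 divisions _ hpre
  unfold Spec_divide_dictionary
  by_cases hpos : 0 < divisions
  · -- positive number of divisions
    set s : Int := PySem.Int.floordiv (dict1.length : Int) divisions with hs
    have hs0 : 0 ≤ s := by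
      rw [hs, PySem.Int.floordiv_eq_ediv_of_pos hpos]
      exact Int.ediv_nonneg (by positivity) (le_of_lt hpos)
    set secN : Nat := s.toNat with hsecN
    have hcast : (secN : Int) = s := Int.toNat_of_nonneg hs0
    set N : Nat := divisions.toNat with hN
    have hNc : (N : Int) = divisions := Int.toNat_of_nonneg (le_of_lt hpos)
    -- B's side
    have hbound : N * secN ≤ dict1.length := by
      have h1 : divisions * s ≤ (dict1.length : Int) := by
        rw [hs, PySem.Int.floordiv_eq_ediv_of_pos hpos, mul_comm]
        exact Int.ediv_mul_le _ (by omega)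
      have h2 : ((N * secN : Nat) : Int) = divisions * s := by
        push_cast [hcast, hNc]; ring
      omega
    have hB : divide_dictionary_alt dict1 divisions
        = (List.range N).map (fun k => (dict1.drop (k * secN)).take secN) := by
      unfold divide_dictionary_alt
      rw [pv_foldl_ignore, PySem.List.length_pyRange_one]
      have : (divisions - 0).toNat = N := by omega
      rw [this, pv_iterB secN N [] dict1 hpre hbound]
      simp
    -- A's side
    have hA : divide_dictionary dict1 divisions
        = (PySem.List.pyRange 0 divisions 1).map (fun i =>
            ((PySem.List.pyRange ((divideRange divisions (dict1.length : Int) i 0).1)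
                ((divideRange divisions (dict1.length : Int) i 0).2) 1).foldl
              (fun d j =>
                PySem.Dict.insert d (PySem.List.pyGetD (dict1.map Prod.fst) j "")
                  ((PySem.Dict.mk dict1).getD (PySem.List.pyGetD (dict1.map Prod.fst) j "") 0))
              PySem.Dict.empty).items) := by
      unfold divide_dictionary
      rw [PySem.List.foldl_append_singleton_eq_map]
      simp
    rw [hA, hB, PySem.List.pyRange_one 0 divisions]
    rw [List.map_map]
    have hrange : (divisions - 0).toNat = N := by omega
    rw [hrange]
    apply List.map_congr_left
    intro k hk
    have hkN : k < N := List.mem_range.mp hk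
    have hki : (0 : Int) ≤ (k : Int) := by positivity
    have hklt : (k : Int) < divisions := by omega
    have hdr : divideRange divisions (dict1.length : Int) ((0 : Int) + (k : Int)) 0
        = ((k : Int) * s, (k : Int) * s + s) := by
      unfold divideRange
      rw [if_neg]
      · simp [← hs]
      · rintro ⟨-, habs⟩
        omega
    simp only [Function.comp, hdr]
    rw [pv_innerA dict1 divisions (k : Int) hpre hpos hki hklt]
    have h1 : ((k : Int) * s).toNat = k * secN := by
      rw [← hcast, ← Nat.cast_mul, Int.toNat_natCast]
    rw [← hs, h1, hsecN]
  · -- divisions ≤ 0: the loop never runs in either version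
    have hnil : PySem.List.pyRange 0 divisions 1 = [] :=
      PySem.List.pyRange_one_eq_nil (by omega)
    simp [divide_dictionary, divide_dictionary_alt, hnil]
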